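-- pv_equiv track=rewrite | github.com/getsentry/sentry | src/sentry/snuba/metrics_layer/api.py | _get_granularity
-- ===== SOURCE A (Python) =====
-- from typing import Any, Dict, List, Mapping, Optional, Sequence, Tuple, Union
--
-- GRANULARITIES = [
--     10,  # 10 seconds
--     60,  # 1 minute
--     60 * 60,  # 1 hour
--     60 * 60 * 24,  # 24 hours
-- ]
--
-- class InvalidMetricsQuery(Exception):
--     pass
--
-- def _get_granularity(interval: int) -> int:
--     best_granularity: Optional[int] = None
--
--     for granularity in sorted(GRANULARITIES):
--         if granularity <= interval:
--             best_granularity = granularity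
--
--     if best_granularity is None:
--         raise InvalidMetricsQuery("The interval specified is lower than the minimum granularity")
--
--     return best_granularity
-- ===== SOURCE B (Python) =====
-- from typing import Optional
--
-- GRANULARITIES = [
--     10,  # 10 seconds
--     60,  # 1 minute
--     60 * 60,  # 1 hour
--     60 * 60 * 24,  # 24 hours
-- ]
--
-- class InvalidMetricsQuery(Exception):
--     pass
--
-- def _get_granularity(interval: int) -> int:
--     # Binary search (bisect_right by hand) on the already-sorted GRANULARITIES.
--     lo, hi = 0, len(GRANULARITIES)
--     while lo < hi:
--         mid = (lo + hi) // 2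
--         if GRANULARITIES[mid] <= interval:
--             lo = mid + 1
--         else:
--             hi = mid
--     if lo == 0:
--         raise InvalidMetricsQuery("The interval specified is lower than the minimum granularity")
--     return GRANULARITIES[lo - 1]
-- ===== Notes on version B (the rewrite author's own statement) =====
-- stated objective: alternative
-- what changed: Replaces A's linear keep-the-largest scan over sorted(GRANULARITIES) with a hand-written bisect_right binary search returning the element just below the insertion point.
import Mathlib
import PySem

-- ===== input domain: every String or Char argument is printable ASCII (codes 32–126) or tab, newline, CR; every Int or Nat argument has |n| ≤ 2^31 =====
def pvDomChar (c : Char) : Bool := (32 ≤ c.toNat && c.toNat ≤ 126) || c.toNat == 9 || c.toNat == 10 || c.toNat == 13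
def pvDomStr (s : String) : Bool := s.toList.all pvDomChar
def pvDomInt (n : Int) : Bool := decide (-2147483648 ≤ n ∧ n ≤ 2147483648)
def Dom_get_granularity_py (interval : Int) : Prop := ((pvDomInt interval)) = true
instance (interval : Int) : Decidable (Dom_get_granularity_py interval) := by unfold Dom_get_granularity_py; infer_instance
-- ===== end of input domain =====

-- B replaces A's linear keep-the-largest scan with a hand-written bisect_right binary search
-- on the already-sorted granularity list (alternative algorithm; same result).


def pvGranularities : List Int := [10, 60, 60 * 60, 60 * 60 * 24]

-- ===== PORT A =====
-- A: scan sorted(GRANULARITIES), keep the largest granularity ≤ interval; raise if none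
-- (the raising branch is excluded by Pre_; the port returns 0 there, a value A never returns).
def get_granularity_py (interval : Int) : Int :=
  let best : Option Int :=
    (PySem.List.sorted pvGranularities (fun x => x) false).foldl
      (fun best g => if g ≤ interval then some g else best) none
  match best with
  | none => 0
  | some g => g

-- ===== PORT B =====
-- B: bisect_right by hand; the while loop is ported with fuel = hi - lo making the same
-- computation total (lo/hi are Nat indices, always in range; GRANULARITIES[mid] via pyGet?).
def pvBisect (interval : Int) : Nat → Nat → Nat → Nat
  | 0, lo, _ => lo
  | fuel + 1, lo, hi =>
    if lo < hi then
      let mid := (lo + hi) / 2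
      if (PySem.List.pyGet? pvGranularities (mid : Int)).getD 0 ≤ interval then
        pvBisect interval fuel (mid + 1) hi
      else
        pvBisect interval fuel lo mid
    else lo

def get_granularity_py_alt (interval : Int) : Int :=
  let lo := pvBisect interval pvGranularities.length 0 pvGranularities.length
  if lo = 0 then 0  -- A raises here; excluded by Pre_
  else (PySem.List.pyGet? pvGranularities ((lo : Int) - 1)).getD 0

-- ===== PRECONDITION & SPEC =====
-- Pre_ excludes exactly the inputs where A raises InvalidMetricsQuery: interval below 10.
def Pre_get_granularity_py (interval : Int) : Prop := 10 ≤ interval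
instance (interval : Int) : Decidable (Pre_get_granularity_py interval) := by unfold Pre_get_granularity_py; infer_instance
def pvWitness_get_granularity_py : Int := 60

def Spec_get_granularity_py (interval : Int) (out : Int) : Prop := out = get_granularity_py_alt interval
instance (interval : Int) (out : Int) : Decidable (Spec_get_granularity_py interval out) := by unfold Spec_get_granularity_py; infer_instance

-- ===== CLAIM (what is proved, stated in full; the proofs are below) =====
def Claim_equal_get_granularity_py : Prop := ∀ (interval : Int), Dom_get_granularity_py interval → Pre_get_granularity_py interval → Spec_get_granularity_py interval (get_granularity_py interval)

-- ===== LEMMAS AND PROOFS =====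

-- ===== VERDICT (by name: the statement is the Claim_ definition above) =====
theorem pvA_closed (interval : Int) : get_granularity_py interval =
    (if 86400 ≤ interval then 86400 else if 3600 ≤ interval then 3600
     else if 60 ≤ interval then 60 else if 10 ≤ interval then 10 else 0) := by
  unfold get_granularity_py
  have hs : PySem.List.sorted pvGranularities (fun x => x) false = pvGranularities := by decide
  rw [hs]
  simp only [pvGranularities, List.foldl]
  split_ifs <;> simp_all

set_option maxHeartbeats 1000000 in
theorem pvB_closed (interval : Int) : get_granularity_py_alt interval =
    (if 86400 ≤ interval then 86400 else if 3600 ≤ interval then 3600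
     else if 60 ≤ interval then 60 else if 10 ≤ interval then 10 else 0) := by
  unfold get_granularity_py_alt
  by_cases h1 : 86400 ≤ interval <;> by_cases h2 : 3600 ≤ interval <;>
    by_cases h3 : 60 ≤ interval <;> by_cases h4 : 10 ≤ interval <;>
    simp [pvBisect, pvGranularities, PySem.List.pyGet?, PySem.List.pyIdx?, h1, h2, h3, h4] <;>
    omega

theorem get_granularity_py_spec : Claim_equal_get_granularity_py := by
  intro interval _ hpre
  unfold Spec_get_granularity_py
  rw [pvA_closed, pvB_closed]
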